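-- pv_equiv track=rewrite | github.com/thetwelvedev/aprendendo-python | Beecrowd/1024.py | criptografia
-- ===== SOURCE A (Python) =====
-- def criptografia(senha: str) -> str:
--     senha = list(senha.strip("\n"))  # converte para lista de caracteres
--     contador = len(senha)
--
--     # 1. Letras minúsculas e maiúsculas são deslocadas 3 posições para a direita
--     for i in range(contador):
--         if ('A' <= senha[i] <= 'Z') or ('a' <= senha[i] <= 'z'):
--             senha[i] = chr(ord(senha[i]) + 3)
--
--     # 2. Inverter toda a string
--     senha.reverse()
--
--     # 3. Metade final desloca 1 posição para a esquerda
--     for i in range(contador // 2, contador):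
--         senha[i] = chr(ord(senha[i]) - 1)
--
--     return "".join(senha)
-- ===== SOURCE B (Python) =====
-- def criptografia(senha: str) -> str:
--     s = senha.strip("\n")
--     n = len(s)
--     h = n // 2
--     out = []
--     for j in range(n):
--         c = s[n - 1 - j]
--         if 'A' <= c <= 'Z' or 'a' <= c <= 'z':
--             c = chr(ord(c) + 3)
--         if j >= h:
--             c = chr(ord(c) - 1)
--         out.append(c)
--     return "".join(out)
-- ===== Notes on version B (the rewrite author's own statement) =====
-- stated objective: alternative
-- what changed: Replaces A's three in-place mutation phases (letter-shift loop, reverse, back-half decrement loop) by one pass that builds the output directly: position j reads source index n-1-j, shifts letters by +3 and decrements iff j >= n//2.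
import Mathlib
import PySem

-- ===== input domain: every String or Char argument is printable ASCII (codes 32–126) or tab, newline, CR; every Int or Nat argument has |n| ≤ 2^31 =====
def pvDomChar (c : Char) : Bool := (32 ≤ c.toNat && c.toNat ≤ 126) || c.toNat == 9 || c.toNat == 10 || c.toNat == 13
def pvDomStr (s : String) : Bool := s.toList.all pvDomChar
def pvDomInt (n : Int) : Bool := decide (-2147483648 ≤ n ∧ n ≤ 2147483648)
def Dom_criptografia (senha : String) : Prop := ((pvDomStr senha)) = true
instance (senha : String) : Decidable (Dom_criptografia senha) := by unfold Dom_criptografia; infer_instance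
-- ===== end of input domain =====

-- B computes the same encryption in ONE pass over output positions instead of A's three
-- in-place mutation phases; same cost, different decomposition (objective: alternative).

-- ===== PORT A =====
def criptografia (senha : String) : String :=
  let cs0 := (PySem.Str.stripChars senha "\n").toList
  let contador : Int := cs0.length
  let cs1 := (PySem.List.pyRange 0 contador 1).foldl (fun xs i =>
      if ('A' ≤ PySem.List.pyGetD xs i ' ' ∧ PySem.List.pyGetD xs i ' ' ≤ 'Z') ∨
         ('a' ≤ PySem.List.pyGetD xs i ' ' ∧ PySem.List.pyGetD xs i ' ' ≤ 'z') then
        PySem.List.pySetD xs i (Char.ofNat ((PySem.List.pyGetD xs i ' ').toNat + 3))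
      else xs) cs0
  let cs2 := cs1.reverse
  let cs3 := (PySem.List.pyRange (PySem.Int.floordiv contador 2) contador 1).foldl (fun xs i =>
      PySem.List.pySetD xs i (Char.ofNat ((PySem.List.pyGetD xs i ' ').toNat - 1))) cs2
  String.ofList cs3

-- ===== PORT B =====
def criptografia_alt (senha : String) : String :=
  let s := (PySem.Str.stripChars senha "\n").toList
  let n : Int := s.length
  let h := PySem.Int.floordiv n 2
  String.ofList ((PySem.List.pyRange 0 n 1).map (fun j =>
    let c := PySem.List.pyGetD s (n - 1 - j) ' '
    let c := if ('A' ≤ c ∧ c ≤ 'Z') ∨ ('a' ≤ c ∧ c ≤ 'z') then Char.ofNat (c.toNat + 3) else c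
    if h ≤ j then Char.ofNat (c.toNat - 1) else c))

-- ===== PRECONDITION & SPEC =====
def Spec_criptografia (senha : String) (out : String) : Prop := out = criptografia_alt senha
instance (senha : String) (out : String) : Decidable (Spec_criptografia senha out) := by unfold Spec_criptografia; infer_instance

-- ===== CLAIM (what is proved, stated in full; the proofs are below) =====
def Claim_equal_criptografia : Prop := ∀ (senha : String), Dom_criptografia senha → Spec_criptografia senha (criptografia senha)

-- ===== LEMMAS AND PROOFS =====

def pvF3 (c : Char) : Char :=
  if ('A' ≤ c ∧ c ≤ 'Z') ∨ ('a' ≤ c ∧ c ≤ 'z') then Char.ofNat (c.toNat + 3) else c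

def pvDec (c : Char) : Char := Char.ofNat (c.toNat - 1)

-- an index loop 'for i in range(len(pre), len(pre)+len(suf)): xs[i] = u(xs[i])' maps u over suf
theorem pvSetLoop (u : Char → Char) (F : List Char → Int → List Char)
    (hF : ∀ (xs : List Char) (k : Nat), k < xs.length →
        F xs (k : Int) = PySem.List.pySetD xs (k : Int) (u (PySem.List.pyGetD xs (k : Int) ' ')))
    : ∀ (suf pre : List Char),
      (PySem.List.pyRange (pre.length : Int) ((pre.length + suf.length : Nat) : Int) 1).foldl F (pre ++ suf)
        = pre ++ suf.map u := by
  intro suf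
  induction suf with
  | nil =>
      intro pre
      rw [PySem.List.pyRange_one_eq_nil (by simp)]
      simp
  | cons c rest ih =>
      intro pre
      have hlt : (pre.length : Int) < ((pre.length + (c :: rest).length : Nat) : Int) := by
        simp only [List.length_cons]; push_cast; omega
      rw [PySem.List.pyRange_one_cons hlt]
      simp only [List.foldl_cons]
      have hk : pre.length < (pre ++ c :: rest).length := by simp
      rw [hF _ pre.length hk]
      have hget : PySem.List.pyGetD (pre ++ c :: rest) (pre.length : Int) ' ' = c := by
        simp [PySem.List.pyGetD_natCast, List.getD_eq_getElem?_getD]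
      have hset : PySem.List.pySetD (pre ++ c :: rest) (pre.length : Int) (u c)
          = (pre ++ [u c]) ++ rest := by
        simp [PySem.List.pySetD_natCast, List.set_append_right]
      rw [hget, hset]
      have := ih (pre ++ [u c])
      have harg : ((pre ++ [u c]).length : Int) = (pre.length : Int) + 1 := by
        simp only [List.length_append, List.length_cons, List.length_nil]; push_cast; ring
      have hbnd : (((pre ++ [u c]).length + rest.length : Nat) : Int)
          = ((pre.length + (c :: rest).length : Nat) : Int) := by
        simp only [List.length_append, List.length_cons, List.length_nil]; push_cast; ring
      rw [harg, hbnd] at this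
      rw [this]
      simp

theorem criptografia_eq (senha : String) : criptografia senha = criptografia_alt senha := by
  simp only [criptografia, criptografia_alt]
  generalize (PySem.Str.stripChars senha "\n").toList = cs
  set m := cs.length with hm
  clear_value m
  -- phase 1 of A is a map of pvF3
  have h1 : (PySem.List.pyRange 0 (m : Int) 1).foldl (fun xs i =>
      if ('A' ≤ PySem.List.pyGetD xs i ' ' ∧ PySem.List.pyGetD xs i ' ' ≤ 'Z') ∨
         ('a' ≤ PySem.List.pyGetD xs i ' ' ∧ PySem.List.pyGetD xs i ' ' ≤ 'z') then
        PySem.List.pySetD xs i (Char.ofNat ((PySem.List.pyGetD xs i ' ').toNat + 3))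
      else xs) cs = cs.map pvF3 := by
    have := pvSetLoop pvF3 (fun xs i =>
      if ('A' ≤ PySem.List.pyGetD xs i ' ' ∧ PySem.List.pyGetD xs i ' ' ≤ 'Z') ∨
         ('a' ≤ PySem.List.pyGetD xs i ' ' ∧ PySem.List.pyGetD xs i ' ' ≤ 'z') then
        PySem.List.pySetD xs i (Char.ofNat ((PySem.List.pyGetD xs i ' ').toNat + 3))
      else xs) ?_ cs []
    · rw [hm]; simpa using this
    · intro xs k hk
      have hg : PySem.List.pyGetD xs (k : Int) ' ' = xs[k] := by
        rw [PySem.List.pyGetD_natCast, List.getD_eq_getElem?_getD, List.getElem?_eq_getElem hk]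
        rfl
      simp only [PySem.List.pySetD_natCast, hg]
      simp only [pvF3]
      by_cases hc : ('A' ≤ xs[k] ∧ xs[k] ≤ 'Z') ∨ ('a' ≤ xs[k] ∧ xs[k] ≤ 'z')
      · rw [if_pos hc, if_pos hc]
      · rw [if_neg hc, if_neg hc, List.set_getElem_self hk]
  rw [h1]
  -- phase 3 of A: map pvDec over the back half of the reversed list
  set rev := (cs.map pvF3).reverse with hrev
  have hrevlen : rev.length = m := by simp [hrev, hm]
  have hfd : PySem.Int.floordiv (m : Int) 2 = ((m / 2 : Nat) : Int) := by
    show ((m : Int)).fdiv 2 = ((m / 2 : Nat) : Int)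
    rw [Int.fdiv_eq_ediv]
    simp
  have h3 : (PySem.List.pyRange (PySem.Int.floordiv (m : Int) 2) (m : Int) 1).foldl (fun xs i =>
      PySem.List.pySetD xs i (Char.ofNat ((PySem.List.pyGetD xs i ' ').toNat - 1))) rev
      = rev.take (m / 2) ++ (rev.drop (m / 2)).map pvDec := by
    have hpre : (rev.take (m / 2)).length = m / 2 := by
      simp [hrevlen]; omega
    have := pvSetLoop pvDec (fun xs i =>
      PySem.List.pySetD xs i (Char.ofNat ((PySem.List.pyGetD xs i ' ').toNat - 1))) ?_
      (rev.drop (m / 2)) (rev.take (m / 2))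
    · rw [List.take_append_drop] at this
      rw [hfd]
      have hlen : ((rev.take (m / 2)).length + (rev.drop (m / 2)).length : Nat) = m := by
        simp [hrevlen]
        omega
      rw [hlen, hpre] at this
      exact this
    · intro xs k hk
      rfl
  rw [h3]
  -- B's single pass produces the same list
  congr 1
  apply List.ext_getElem
  · simp [PySem.List.length_pyRange_one, hrevlen]
    omega
  · intro j hj1 hj2
    have hjm : j < m := by
      simp [hrevlen] at hj1
      omega
    have hpl : (rev.take (m / 2)).length = m / 2 := by
      rw [List.length_take, hrevlen]; omega
    rw [List.getElem_map, PySem.List.getElem_pyRange_one]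
    simp only [zero_add, hfd]
    have hc : PySem.List.pyGetD cs ((m : Int) - 1 - (j : Int)) ' '
        = cs[m - 1 - j]'(by omega) := by
      have hidx0 : (m : Int) - 1 - (j : Int) = ((m - 1 - j : Nat) : Int) := by omega
      rw [hidx0, PySem.List.pyGetD_natCast, List.getD_eq_getElem?_getD,
          List.getElem?_eq_getElem (by omega)]
      rfl
    rw [hc]
    by_cases hhalf : j < m / 2
    · have hcond : ¬ ((m / 2 : Nat) : Int) ≤ (j : Int) := by push_cast; omega
      rw [if_neg hcond]
      rw [List.getElem_append_left (by rw [hpl]; omega)]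
      simp only [List.getElem_take, hrev, List.getElem_reverse, List.getElem_map,
        List.length_map, ← hm, pvF3]
    · have hcond : ((m / 2 : Nat) : Int) ≤ (j : Int) := by push_cast; omega
      rw [if_pos hcond]
      rw [List.getElem_append_right (by rw [hpl]; omega)]
      have hmin : min (m / 2) m = m / 2 := by omega
      have hidx : m - 1 - (m / 2 + (j - m / 2)) = m - 1 - j := by omega
      simp only [List.getElem_map, List.getElem_drop, hrev, List.getElem_reverse,
        List.length_map, List.length_take, List.length_reverse, ← hm, hmin, hidx, pvF3, pvDec]

-- ===== VERDICT (by name: the statement is the Claim_ definition above) =====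
theorem criptografia_spec : Claim_equal_criptografia := by
  intro senha _
  unfold Spec_criptografia
  exact criptografia_eq senha
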